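-- pv_equiv track=rewrite | github.com/cybertronai/ByteDMD-definition | docs/report-antigravity-flash-attention/attention_impl.py | flash_flops
-- ===== SOURCE A (Python) =====
-- def flash_flops(N, d, Bk):
--     f = 0
--     num_blocks = (N + Bk - 1) // Bk
--     for _ in range(N):  # per query row
--         for kb in range(num_blocks):
--             bsz = min(Bk, N - kb * Bk)
--             f += bsz * (2 * d - 1)       # block scores
--             f += max(0, bsz - 1)         # block max
--             f += bsz + bsz              # sub_max + exp
--             f += max(0, bsz - 1)         # block sum
--             f += d * (2 * bsz - 1)       # block output
--             if kb > 0:                   # merge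
--                 f += 1 + 2 + 2 + 3 + d * 3  # max, alpha, beta, l_update, o_update
--         f += 1 + d                       # inv + normalize
--     return f
-- ===== SOURCE B (Python) =====
-- def flash_flops(N, d, Bk):
--     # Closed form: every query row costs the same, and within a row all key
--     # blocks are full (size Bk) except possibly the last partial one.
--     if N <= 0:
--         return 0
--     m = (N + Bk - 1) // Bk  # number of key blocks
--     per_row = N * (4 * d + 3) - m * (d + 2) + (m - 1) * (3 * d + 8) + 1 + d
--     return N * per_row
-- ===== Notes on version B (the rewrite author's own statement) =====
-- stated objective: faster
-- what changed: Replaces the N x num_blocks nested counting loops by a closed-form formula: each query row has identical cost, expressed via the total key count N, the number of blocks m, and m-1 merge steps.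
-- outside the precondition, e.g. on flash_flops(4, 3, -2): A returns 16, B returns 140
import Mathlib
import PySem

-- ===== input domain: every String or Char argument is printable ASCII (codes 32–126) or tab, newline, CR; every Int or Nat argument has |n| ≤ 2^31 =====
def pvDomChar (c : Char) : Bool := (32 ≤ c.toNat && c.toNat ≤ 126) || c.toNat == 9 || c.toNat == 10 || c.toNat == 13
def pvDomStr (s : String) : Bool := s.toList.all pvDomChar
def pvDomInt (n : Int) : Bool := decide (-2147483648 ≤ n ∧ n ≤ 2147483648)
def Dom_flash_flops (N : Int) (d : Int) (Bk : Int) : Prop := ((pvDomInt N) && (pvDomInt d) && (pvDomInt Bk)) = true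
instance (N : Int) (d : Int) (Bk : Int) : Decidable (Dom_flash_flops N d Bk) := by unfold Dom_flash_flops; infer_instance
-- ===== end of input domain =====

-- B replaces the nested per-row/per-block counting loops by a closed-form formula (faster: O(1) vs O(N^2/Bk)).

-- ===== PORT A =====
-- literal transliteration: nested folds over the same ranges, same per-block increments
def flash_flops (N : Int) (d : Int) (Bk : Int) : Int :=
  let num_blocks := PySem.Int.floordiv (N + Bk - 1) Bk
  (PySem.List.pyRange 0 N 1).foldl (fun f _ =>
    let f := (PySem.List.pyRange 0 num_blocks 1).foldl (fun f kb =>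
      let bsz := min Bk (N - kb * Bk)
      let f := f + bsz * (2 * d - 1)
      let f := f + max 0 (bsz - 1)
      let f := f + bsz + bsz
      let f := f + max 0 (bsz - 1)
      let f := f + d * (2 * bsz - 1)
      if kb > 0 then f + (1 + 2 + 2 + 3 + d * 3) else f) f
    f + (1 + d)) 0

-- ===== PORT B =====
def flash_flops_alt (N : Int) (d : Int) (Bk : Int) : Int :=
  if N ≤ 0 then 0
  else
    let m := PySem.Int.floordiv (N + Bk - 1) Bk
    let per_row := N * (4 * d + 3) - m * (d + 2) + (m - 1) * (3 * d + 8) + 1 + d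
    N * per_row

-- ===== PRECONDITION & SPEC =====
-- Pre_ restricts to the natural domain of a block size: Bk = 0 makes A raise ZeroDivisionError,
-- and negative Bk is a meaningless block size on which A's returned count is an artefact of min/max on negatives.
def Pre_flash_flops (N : Int) (d : Int) (Bk : Int) : Prop := 1 ≤ Bk
instance (N : Int) (d : Int) (Bk : Int) : Decidable (Pre_flash_flops N d Bk) := by unfold Pre_flash_flops; infer_instance
def pvWitness_flash_flops : Int × Int × Int := (5, 3, 2)
def Spec_flash_flops (N : Int) (d : Int) (Bk : Int) (out : Int) : Prop := out = flash_flops_alt N d Bk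
instance (N : Int) (d : Int) (Bk : Int) (out : Int) : Decidable (Spec_flash_flops N d Bk out) := by unfold Spec_flash_flops; infer_instance

-- ===== CLAIM (what is proved, stated in full; the proofs are below) =====
def Claim_equal_flash_flops : Prop := ∀ (N : Int) (d : Int) (Bk : Int), Dom_flash_flops N d Bk → Pre_flash_flops N d Bk → Spec_flash_flops N d Bk (flash_flops N d Bk)

-- ===== LEMMAS AND PROOFS =====

-- the per-block body of A's inner loop
def pvBlock (N d Bk : Int) (f kb : Int) : Int :=
  let bsz := min Bk (N - kb * Bk)
  let f := f + bsz * (2 * d - 1)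
  let f := f + max 0 (bsz - 1)
  let f := f + bsz + bsz
  let f := f + max 0 (bsz - 1)
  let f := f + d * (2 * bsz - 1)
  if kb > 0 then f + (1 + 2 + 2 + 3 + d * 3) else f

theorem pvBlock_eq (N d Bk f kb : Int) (h1 : 1 ≤ min Bk (N - kb * Bk)) :
    pvBlock N d Bk f kb =
      f + (min Bk (N - kb * Bk)) * (4 * d + 3) - (d + 2) + (if kb > 0 then 3 * d + 8 else 0) := by
  unfold pvBlock
  have h2 : max 0 (min Bk (N - kb * Bk) - 1) = min Bk (N - kb * Bk) - 1 := by omega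
  simp only [h2]
  split_ifs <;> ring

-- prefix of k full blocks
theorem pvPrefix (N d Bk : Int) (hBk : 1 ≤ Bk) :
    ∀ (k : Nat) (f : Int), (k : Int) * Bk < N →
      (PySem.List.pyRange 0 (k : Int) 1).foldl (pvBlock N d Bk) f =
        f + (k : Int) * (Bk * (4 * d + 3) - (d + 2)) +
          (if (k : Int) ≤ 0 then 0 else ((k : Int) - 1) * (3 * d + 8)) := by
  intro k
  induction k with
  | zero => intro f h; simp [PySem.List.pyRange_one_eq_nil]
  | succ k ih =>
    intro f h
    have hcast : ((k + 1 : Nat) : Int) = (k : Int) + 1 := by push_cast; ring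
    rw [hcast] at h ⊢
    have hfull : Bk ≤ N - (k : Int) * Bk := by nlinarith
    have hkN : (k : Int) * Bk < N := by nlinarith
    rw [PySem.List.pyRange_one_succ_right (by omega), List.foldl_append, ih f hkN]
    simp only [List.foldl_cons, List.foldl_nil]
    have hmin : min Bk (N - (k : Int) * Bk) = Bk := by omega
    rw [pvBlock_eq N d Bk _ (k : Int) (by omega), hmin,
        if_neg (show ¬((k : Int) + 1 ≤ 0) by omega)]
    by_cases hk0 : (k : Int) ≤ 0
    · rw [if_pos hk0, if_neg (show ¬((k : Int) > 0) by omega)]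
      have hz : (k : Int) = 0 := by omega
      rw [hz]; ring
    · rw [if_neg hk0, if_pos (show (k : Int) > 0 by omega)]
      ring

-- A's inner loop over all m blocks, m = ceil(N / Bk), last block possibly partial
theorem pvInner (N d Bk : Int) (hBk : 1 ≤ Bk) (hN : 1 ≤ N) (f : Int)
    (m : Int) (hm : m = PySem.Int.floordiv (N + Bk - 1) Bk) :
    (PySem.List.pyRange 0 m 1).foldl (pvBlock N d Bk) f =
      f + N * (4 * d + 3) - m * (d + 2) + (m - 1) * (3 * d + 8) := by
  -- ceiling bounds: (m-1)*Bk < N <= m*Bk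
  have hfd : m = (N + Bk - 1) / Bk := by
    rw [hm, PySem.Int.floordiv_eq_ediv_of_pos (by omega)]
  have hdm : m * Bk + (N + Bk - 1) % Bk = N + Bk - 1 := by
    rw [hfd, Int.mul_comm ((N + Bk - 1) / Bk) Bk]
    exact Int.mul_ediv_add_emod (N + Bk - 1) Bk
  have hr0 : 0 ≤ (N + Bk - 1) % Bk := Int.emod_nonneg _ (by omega)
  have hr1 : (N + Bk - 1) % Bk < Bk := Int.emod_lt_of_pos _ (by omega)
  have hub : N ≤ m * Bk := by omega
  have hlb : m * Bk - Bk < N := by omega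
  have hm1 : 1 ≤ m := by nlinarith
  -- split off the last block
  obtain ⟨k, hk⟩ : ∃ k : Nat, m = (k : Int) + 1 := ⟨(m - 1).toNat, by omega⟩
  have hkB : (k : Int) * Bk = m * Bk - Bk := by rw [show (k : Int) = m - 1 by omega]; ring
  rw [hk, PySem.List.pyRange_one_succ_right (by omega), List.foldl_append,
      pvPrefix N d Bk hBk k f (by omega)]
  simp only [List.foldl_cons, List.foldl_nil]
  have hbsz : min Bk (N - (k : Int) * Bk) = N - (k : Int) * Bk := by omega
  rw [pvBlock_eq N d Bk _ (k : Int) (by omega), hbsz,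
      show (k : Int) = m - 1 by omega]
  by_cases hk0 : m - 1 ≤ (0 : Int)
  · rw [if_pos hk0, if_neg (show ¬((m : Int) - 1 > 0) by omega)]
    have hz : m = 1 := by omega
    rw [hz]; ring
  · rw [if_neg hk0, if_pos (show (m : Int) - 1 > 0 by omega)]
    ring

-- outer fold: each row adds the same constant
theorem pvOuter (R : Int) (l : List Int) (f : Int) :
    l.foldl (fun f _ => f + R) f = f + (l.length : Int) * R := by
  induction l generalizing f with
  | nil => simp
  | cons a t ih => simp [ih]; ring

-- ===== VERDICT (by name: the statement is the Claim_ definition above) =====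
theorem flash_flops_spec : Claim_equal_flash_flops := by
  intro N d Bk _ hBk
  unfold Spec_flash_flops flash_flops flash_flops_alt Pre_flash_flops at *
  by_cases hN : N ≤ 0
  · rw [if_pos hN]
    have : PySem.List.pyRange 0 N 1 = [] := PySem.List.pyRange_one_eq_nil (by omega)
    simp [this]
  · rw [if_neg hN]
    set m := PySem.Int.floordiv (N + Bk - 1) Bk with hm
    have hinner : ∀ f : Int,
        (fun f _ => (PySem.List.pyRange 0 m 1).foldl (pvBlock N d Bk) f + (1 + d) : Int → Int → Int) f 0 =
        f + (N * (4 * d + 3) - m * (d + 2) + (m - 1) * (3 * d + 8) + 1 + d) := by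
      intro f
      simp only
      rw [pvInner N d Bk hBk (by omega) f m hm]
      ring
    have hfold :
        (PySem.List.pyRange 0 N 1).foldl (fun f _ =>
          (PySem.List.pyRange 0 m 1).foldl (pvBlock N d Bk) f + (1 + d)) 0 =
        (PySem.List.pyRange 0 N 1).foldl (fun f _ =>
          f + (N * (4 * d + 3) - m * (d + 2) + (m - 1) * (3 * d + 8) + 1 + d)) 0 := by
      apply PySem.List.foldl_congr_mem
      intro f x _; exact hinner f
    calc (PySem.List.pyRange 0 N 1).foldl (fun f _ =>
          (PySem.List.pyRange 0 m 1).foldl (pvBlock N d Bk) f + (1 + d)) 0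
        = 0 + ((PySem.List.pyRange 0 N 1).length : Int) *
            (N * (4 * d + 3) - m * (d + 2) + (m - 1) * (3 * d + 8) + 1 + d) := by
          rw [hfold]; exact pvOuter _ _ 0
      _ = N * (N * (4 * d + 3) - m * (d + 2) + (m - 1) * (3 * d + 8) + 1 + d) := by
          rw [PySem.List.length_pyRange_one]
          have : ((N - 0).toNat : Int) = N := by omega
          rw [this]; ring
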